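-- pv_equiv track=rewrite | github.com/jjoniel/budgeteerv0.3 | budget.py | adjust_entity
-- ===== SOURCE A (Python) =====
-- def adjust_entity(string):
--     string = string.upper()
--     updated = ""
--     for e in string:
--         if e == "&":
--             updated += "AND"
--         elif e == "," or e == "'" or e == ".":
--             pass
--         else:
--             updated += e
--
--     return updated
-- ===== SOURCE B (Python) =====
-- def adjust_entity(string):
--     # staged whole-string passes: expand '&' by split/join, then delete each
--     # punctuation mark by splitting on it and re-joining with nothing
--     s = string.upper()
--     s = "AND".join(s.split("&"))
--     for p in (",", "'", "."):
--         s = "".join(s.split(p))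
--     return s
-- ===== Notes on version B (the rewrite author's own statement) =====
-- stated objective: alternative
-- what changed: Replaces the per-character branching loop with string concatenation by staged whole-string passes: split on '&' and join with 'AND', then delete each punctuation mark by a split/join pass of its own.
import Mathlib
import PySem

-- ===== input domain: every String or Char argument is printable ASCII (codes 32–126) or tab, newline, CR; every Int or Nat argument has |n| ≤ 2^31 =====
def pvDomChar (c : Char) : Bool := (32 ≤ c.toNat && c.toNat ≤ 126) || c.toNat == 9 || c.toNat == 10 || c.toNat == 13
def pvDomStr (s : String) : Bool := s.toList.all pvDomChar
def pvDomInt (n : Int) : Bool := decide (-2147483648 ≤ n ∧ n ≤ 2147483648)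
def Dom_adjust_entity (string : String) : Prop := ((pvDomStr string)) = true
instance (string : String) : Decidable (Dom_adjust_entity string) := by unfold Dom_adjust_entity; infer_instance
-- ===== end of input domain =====

-- ===== PORT A =====
-- B rebuilds the string by staged split/join passes instead of A's per-character branching loop (alternative decomposition).
def adjust_entity (string : String) : String :=
  let s := PySem.Str.upper string
  String.ofList (s.toList.foldl (fun acc e =>
    if e = '&' then acc ++ ['A', 'N', 'D']
    else if e = ',' ∨ e = '\'' ∨ e = '.' then acc
    else acc ++ [e]) [])

-- ===== PORT B =====
-- one split/join pass of Source B: rep.join(s.split(sep)) for a one-character separator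
def pvPass (rep : List Char) (sepc : Char) (cs : List Char) : List Char :=
  PySem.Chars.join rep (PySem.Chars.splitOn cs [sepc])

def adjust_entity_alt (string : String) : String :=
  let s0 := (PySem.Str.upper string).toList
  let s1 := pvPass ['A', 'N', 'D'] '&' s0
  let s2 := List.foldl (fun s p => pvPass [] p s) s1 [',', '\'', '.']
  String.ofList s2

-- ===== PRECONDITION & SPEC =====
def Spec_adjust_entity (string : String) (out : String) : Prop := out = adjust_entity_alt string
instance (string : String) (out : String) : Decidable (Spec_adjust_entity string out) := by unfold Spec_adjust_entity; infer_instance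

-- ===== CLAIM (what is proved, stated in full; the proofs are below) =====
def Claim_equal_adjust_entity : Prop := ∀ (string : String), Dom_adjust_entity string → Spec_adjust_entity string (adjust_entity string)

-- ===== LEMMAS AND PROOFS =====

-- the pieces produced by splitting on a single char, as head piece + remaining pieces
def pvPieces (x : Char) : List Char → List Char × List (List Char)
  | [] => ([], [])
  | c :: t =>
    let p := pvPieces x t
    if c = x then ([], p.1 :: p.2) else (c :: p.1, p.2)

theorem pv_go_pieces (x : Char) (fuel : Nat) (l cur : List Char) (acc : List (List Char))
    (h : l.length ≤ fuel) :
    PySem.Chars.splitOn.go [x] fuel l cur acc =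
      acc.reverse ++ ((cur.reverse ++ (pvPieces x l).1) :: (pvPieces x l).2) := by
  induction fuel generalizing l cur acc with
  | zero =>
    have : l = [] := by cases l <;> simp_all
    subst this
    simp [PySem.Chars.splitOn.go, pvPieces]
  | succ n ih =>
    cases l with
    | nil => simp [PySem.Chars.splitOn.go, pvPieces]
    | cons c rest =>
      have hr : rest.length ≤ n := by simpa using h
      by_cases hc : c = x
      · subst hc
        simp only [PySem.Chars.splitOn.go, List.isPrefixOf, BEq.rfl, Bool.true_and,
          if_true, List.length_cons, List.drop_succ_cons, List.length_nil, List.drop_zero]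
        rw [ih rest [] ((cur.reverse) :: acc) hr]
        simp [pvPieces]
      · have hb : ([x].isPrefixOf (c :: rest)) = false := by
          simp [List.isPrefixOf]
          exact fun h' => hc h'.symm
        simp only [PySem.Chars.splitOn.go, hb, if_neg, Bool.false_eq_true,
          not_false_eq_true]
        rw [ih rest (c :: cur) acc hr]
        simp [pvPieces, hc]
  -- equations of splitOn.go are used above; it is exact per its definition

theorem pv_splitOn_pieces (x : Char) (l : List Char) :
    PySem.Chars.splitOn l [x] = ((pvPieces x l).1 :: (pvPieces x l).2) := by
  have := pv_go_pieces x (l.length + 1) l [] [] (by omega)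
  simpa [PySem.Chars.splitOn] using this

theorem pv_intercalate_cons (sep h : List Char) (t : List (List Char)) :
    sep.intercalate (h :: t) = h ++ t.flatMap (fun p => sep ++ p) := by
  induction t generalizing h with
  | nil => simp [List.intercalate]
  | cons p ps ih =>
    simp only [List.intercalate, List.intersperse, List.flatten] at ih ⊢
    rw [List.flatMap_cons]
    simp [ih]

theorem pv_pass_eq (rep : List Char) (x : Char) (l : List Char) :
    pvPass rep x l = l.flatMap (fun c => if c = x then rep else [c]) := by
  unfold pvPass
  rw [pv_splitOn_pieces]
  show List.intercalate rep _ = _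
  rw [pv_intercalate_cons]
  induction l with
  | nil => simp [pvPieces]
  | cons c t ih =>
    by_cases hc : c = x
    · subst hc
      simp only [pvPieces, List.flatMap_cons, if_true]
      rw [← ih]
      simp
    · simp only [pvPieces, List.flatMap_cons, if_neg hc]
      rw [← ih]
      simp

-- A's accumulator loop as a flatMap
def pvG (e : Char) : List Char :=
  if e = '&' then ['A', 'N', 'D']
  else if e = ',' ∨ e = '\'' ∨ e = '.' then []
  else [e]

theorem pv_fold_flatMap (l : List Char) (acc : List Char) :
    l.foldl (fun acc e =>
      if e = '&' then acc ++ ['A', 'N', 'D']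
      else if e = ',' ∨ e = '\'' ∨ e = '.' then acc
      else acc ++ [e]) acc = acc ++ l.flatMap pvG := by
  induction l generalizing acc with
  | nil => simp
  | cons c t ih =>
    simp only [List.foldl_cons, List.flatMap_cons, ih, pvG]
    split_ifs <;> simp

-- the four staged passes agree with A's single per-character map
theorem pv_passes_eq_flatMap (l : List Char) :
    List.foldl (fun s p => pvPass [] p s) (pvPass ['A', 'N', 'D'] '&' l) [',', '\'', '.'] =
      l.flatMap pvG := by
  simp only [List.foldl_cons, List.foldl_nil, pv_pass_eq]
  simp only [List.flatMap_assoc]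
  refine List.flatMap_congr (fun c _ => ?_)
  by_cases h1 : c = '&'
  · subst h1; decide
  by_cases h2 : c = ','
  · subst h2; decide
  by_cases h3 : c = '\''
  · subst h3; decide
  by_cases h4 : c = '.'
  · subst h4; decide
  simp [pvG, h1, h2, h3, h4]

-- ===== VERDICT (by name: the statement is the Claim_ definition above) =====
theorem adjust_entity_spec : Claim_equal_adjust_entity := by
  intro s _
  unfold Spec_adjust_entity adjust_entity adjust_entity_alt
  simp only [pv_fold_flatMap, List.nil_append, pv_passes_eq_flatMap]
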